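-- pv_equiv track=rewrite | github.com/Sgupta-Code/AI_TUTOR | backend/utils/web_researcher.py | _create_definition
-- ===== SOURCE A (Python) =====
-- def _create_definition(primary_source, all_sources):
--     """Create a comprehensive definition from multiple sources"""
--     definitions = []
--
--     for source in all_sources:
--         if source.get('summary'):
--             definitions.append(source['summary'])
--         elif source.get('content'):
--             definitions.append(source['content'][:500])
--
--     if definitions:
--         # Use the longest definition (usually most comprehensive)
--         return max(definitions, key=len)
--     else:
--         return f"{primary_source.get('title', 'This topic')} is an important concept that can be explored through various educational resources."
-- ===== SOURCE B (Python) =====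
-- def _candidate(source):
--     summary = source.get('summary')
--     if summary:
--         return summary
--     content = source.get('content')
--     return content[:500] if content else None
--
-- def _create_definition(primary_source, all_sources):
--     """Create a comprehensive definition: rank all candidates by length (stable reverse sort) and take the top one."""
--     ranked = sorted((c for c in map(_candidate, all_sources) if c), key=len, reverse=True)
--     if ranked:
--         return ranked[0]
--     return f"{primary_source.get('title', 'This topic')} is an important concept that can be explored through various educational resources."
-- ===== Notes on version B (the rewrite author's own statement) =====
-- stated objective: alternative
-- what changed: A appends candidates in an explicit loop and scans them with max(key=len); B builds the candidates as a map/filter pipeline over a helper and selects by a stable length-descending sort, returning its head (stability reproduces max's first-wins tie-breaking).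
import Mathlib
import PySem

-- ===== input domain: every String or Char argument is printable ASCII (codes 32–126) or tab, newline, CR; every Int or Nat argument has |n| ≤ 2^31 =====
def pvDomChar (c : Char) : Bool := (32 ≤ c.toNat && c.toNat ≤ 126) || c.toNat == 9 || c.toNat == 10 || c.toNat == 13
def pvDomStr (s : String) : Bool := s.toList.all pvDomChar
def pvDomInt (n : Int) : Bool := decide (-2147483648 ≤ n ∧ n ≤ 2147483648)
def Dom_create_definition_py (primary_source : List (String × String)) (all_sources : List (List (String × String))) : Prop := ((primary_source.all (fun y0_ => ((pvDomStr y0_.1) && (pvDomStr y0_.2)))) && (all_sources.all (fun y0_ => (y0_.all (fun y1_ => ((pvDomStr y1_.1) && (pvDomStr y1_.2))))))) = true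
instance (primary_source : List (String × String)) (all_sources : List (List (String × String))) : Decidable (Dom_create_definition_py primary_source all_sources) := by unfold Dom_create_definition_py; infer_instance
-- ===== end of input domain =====

-- B replaces A's append-loop + max(key=len) with a map/filter candidate pipeline and a stable length-descending sort whose head is taken (stability preserves first-wins ties).


-- ===== PORT A =====
-- A: explicit loop appending candidates to 'definitions', then max(definitions, key=len), else the fallback f-string
def create_definition_py (primary_source : List (String × String)) (all_sources : List (List (String × String))) : String :=
  let definitions : List String := all_sources.foldl
    (fun acc source =>
      let s := (List.lookup "summary" source).getD ""        -- source.get('summary'); falsy = missing or ""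
      if s ≠ "" then acc ++ [s]
      else
        let c := (List.lookup "content" source).getD ""      -- source.get('content')
        if c ≠ "" then acc ++ [PySem.Str.slice c none (some 500)]   -- source['content'][:500]
        else acc) []
  match PySem.List.max? definitions PySem.Str.len with       -- 'if definitions: return max(definitions, key=len)'
  | some m => m
  | none => (List.lookup "title" primary_source).getD "This topic" ++
      " is an important concept that can be explored through various educational resources."

-- ===== PORT B =====
-- helper _candidate: summary if truthy, else content[:500] if truthy, else None
def pvCandidate (source : List (String × String)) : Option String :=
  let summary := (List.lookup "summary" source).getD ""
  if summary ≠ "" then some summary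
  else
    let content := (List.lookup "content" source).getD ""
    if content ≠ "" then some (PySem.Str.slice content none (some 500))
    else none

-- B: map/filter pipeline, stable reverse sort by length, take the head
def create_definition_py_alt (primary_source : List (String × String)) (all_sources : List (List (String × String))) : String :=
  let ranked : List String :=
    PySem.List.sorted ((all_sources.map pvCandidate).filterMap id) PySem.Str.len true
  match ranked with
  | d :: _ => d
  | [] => (List.lookup "title" primary_source).getD "This topic" ++
      " is an important concept that can be explored through various educational resources."

-- ===== PRECONDITION & SPEC =====
def Spec_create_definition_py (primary_source : List (String × String)) (all_sources : List (List (String × String))) (out : String) : Prop := out = create_definition_py_alt primary_source all_sources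
instance (primary_source : List (String × String)) (all_sources : List (List (String × String))) (out : String) : Decidable (Spec_create_definition_py primary_source all_sources out) := by unfold Spec_create_definition_py; infer_instance

-- ===== CLAIM (what is proved, stated in full; the proofs are below) =====
def Claim_equal_create_definition_py : Prop := ∀ (primary_source : List (String × String)) (all_sources : List (List (String × String))), Dom_create_definition_py primary_source all_sources → Spec_create_definition_py primary_source all_sources (create_definition_py primary_source all_sources)

-- ===== LEMMAS AND PROOFS =====

-- head of the insertion-sort fold = Python's max? of the (current head, remaining items): no custom matcher, stated via PySem.List.max?
theorem pv_head_foldl (key : String → Int) (xs pre : List String) :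
    (xs.foldl (fun acc x => PySem.List.insertBy (fun a b => decide (key b < key a)) x acc) pre).head?
      = PySem.List.max? (pre.head?.toList ++ xs) key := by
  induction xs generalizing pre with
  | nil =>
    cases pre <;> rfl
  | cons x t ih =>
    simp only [List.foldl_cons]
    rw [ih]
    cases pre with
    | nil => simp [PySem.List.insertBy]
    | cons y ys =>
      by_cases h : key y < key x <;>
        simp [PySem.List.insertBy, PySem.List.max?, h]

-- head of the stable reverse sort = max? (Python's first-maximal element)
theorem pv_sorted_rev_head (key : String → Int) (xs : List String) :
    (PySem.List.sorted xs key true).head? = PySem.List.max? xs key := by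
  unfold PySem.List.sorted
  simp only [if_true]
  rw [pv_head_foldl]
  rfl

-- A's accumulated 'definitions' list is B's map/filter pipeline
theorem pv_defs_eq (all_sources : List (List (String × String))) (acc : List String) :
    all_sources.foldl
      (fun acc source =>
        let s := (List.lookup "summary" source).getD ""
        if s ≠ "" then acc ++ [s]
        else
          let c := (List.lookup "content" source).getD ""
          if c ≠ "" then acc ++ [PySem.Str.slice c none (some 500)]
          else acc) acc
    = acc ++ (all_sources.map pvCandidate).filterMap id := by
  induction all_sources generalizing acc with
  | nil => simp
  | cons src rest ih =>
    simp only [List.foldl_cons, List.map_cons, List.filterMap_cons]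
    rw [ih]
    unfold pvCandidate
    by_cases h1 : (List.lookup "summary" src).getD "" ≠ "" <;>
      by_cases h2 : (List.lookup "content" src).getD "" ≠ "" <;>
      simp [h1, h2]

-- ===== VERDICT (by name: the statement is the Claim_ definition above) =====
theorem create_definition_py_spec : Claim_equal_create_definition_py := by
  intro primary_source all_sources _
  show create_definition_py primary_source all_sources = create_definition_py_alt primary_source all_sources
  unfold create_definition_py create_definition_py_alt
  rw [pv_defs_eq all_sources []]
  simp only [List.nil_append]
  cases hr : PySem.List.sorted ((all_sources.map pvCandidate).filterMap id) PySem.Str.len true with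
  | nil =>
    have : ((all_sources.map pvCandidate).filterMap id) = [] :=
      (PySem.List.sorted_eq_nil_iff _ _ _).mp hr
    rw [this]
    rfl
  | cons d t =>
    have h := pv_sorted_rev_head PySem.Str.len ((all_sources.map pvCandidate).filterMap id)
    rw [hr] at h
    simp only [List.head?] at h
    rw [← h]
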